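-- pv_equiv track=rewrite | github.com/ArthurJose2000/cmc15 | republican_democrat.py | mostFrequentlyOccurringValue
-- ===== SOURCE A (Python) =====
-- import math
--
-- def segregate(attributearray, value):
--     outlist = []
--     for i, attribute in enumerate(attributearray):
--         if attribute == value:
--             outlist += [i]
--     return outlist
--
-- def mostFrequentlyOccurringValue(labels):
--     bestCount = -math.inf
--     bestId = None
--     for i in range(2):
--         count_i = len(segregate(labels,i))
--         if (count_i > bestCount):
--             bestCount = count_i
--             bestId = i
--     return bestId
-- ===== SOURCE B (Python) =====
-- def mostFrequentlyOccurringValue(labels):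
--     c0 = 0
--     c1 = 0
--     for x in labels:
--         if x == 0:
--             c0 += 1
--         elif x == 1:
--             c1 += 1
--     return 1 if c1 > c0 else 0
-- ===== Notes on version B (the rewrite author's own statement) =====
-- stated objective: simpler
-- what changed: Replaces the segregate helper (an index-list build per candidate) and the loop over range(2) by one counting pass with two counters and a final comparison.
import Mathlib
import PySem

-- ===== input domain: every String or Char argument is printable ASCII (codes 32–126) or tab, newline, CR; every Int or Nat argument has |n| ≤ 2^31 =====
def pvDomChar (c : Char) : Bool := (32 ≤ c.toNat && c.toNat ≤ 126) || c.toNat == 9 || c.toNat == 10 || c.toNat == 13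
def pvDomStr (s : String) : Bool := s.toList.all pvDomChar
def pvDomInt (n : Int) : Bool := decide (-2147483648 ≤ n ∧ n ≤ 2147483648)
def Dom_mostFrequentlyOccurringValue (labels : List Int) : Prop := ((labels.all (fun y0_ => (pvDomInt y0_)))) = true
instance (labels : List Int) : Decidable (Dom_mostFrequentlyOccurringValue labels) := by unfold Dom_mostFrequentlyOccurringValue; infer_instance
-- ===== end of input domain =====

-- B replaces A's per-candidate segregate scans with a single counting pass; objective: simpler.

-- ===== PORT A =====
def segregate (attributearray : List Int) (value : Int) : List Int :=
  (PySem.List.enumerate attributearray).foldl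
    (fun outlist p => if p.2 = value then outlist ++ [p.1] else outlist) []

def mostFrequentlyOccurringValue (labels : List Int) : Int :=
  let st := (PySem.List.pyRange 0 2 1).foldl
    (fun (st : Option Int × Option Int) i =>
      let count_i : Int := (segregate labels i).length
      match st.1 with
      | none => (some count_i, some i)              -- count_i > -inf is always true
      | some bc => if count_i > bc then (some count_i, some i) else st)
    (none, none)
  -- the loop iterates twice, so bestId is always some; the default is unreachable
  st.2.getD 0

-- ===== PORT B =====
def mostFrequentlyOccurringValue_alt (labels : List Int) : Int :=
  let c := labels.foldl
    (fun (c : Int × Int) x => if x = 0 then (c.1 + 1, c.2) else if x = 1 then (c.1, c.2 + 1) else c)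
    (0, 0)
  if c.2 > c.1 then 1 else 0

-- ===== PRECONDITION & SPEC =====
def Spec_mostFrequentlyOccurringValue (labels : List Int) (out : Int) : Prop := out = mostFrequentlyOccurringValue_alt labels
instance (labels : List Int) (out : Int) : Decidable (Spec_mostFrequentlyOccurringValue labels out) := by unfold Spec_mostFrequentlyOccurringValue; infer_instance

-- ===== CLAIM (what is proved, stated in full; the proofs are below) =====
def Claim_equal_mostFrequentlyOccurringValue : Prop := ∀ (labels : List Int), Dom_mostFrequentlyOccurringValue labels → Spec_mostFrequentlyOccurringValue labels (mostFrequentlyOccurringValue labels)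

-- ===== LEMMAS AND PROOFS =====

lemma segregate_length (xs : List Int) (v : Int) (s : Int) (acc : List Int) :
    ((PySem.List.enumerate xs s).foldl
      (fun outlist p => if p.2 = v then outlist ++ [p.1] else outlist) acc).length
    = acc.length + xs.countP (fun a => a == v) := by
  induction xs generalizing s acc with
  | nil => simp [PySem.List.enumerate_nil]
  | cons x xs ih =>
    rw [PySem.List.enumerate_cons]
    simp only [List.foldl_cons, List.countP_cons]
    by_cases h : x = v
    · simp [h, ih]; omega
    · simp [h, ih]

lemma alt_counts (xs : List Int) (a b : Int) :
    xs.foldl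
      (fun (c : Int × Int) x => if x = 0 then (c.1 + 1, c.2) else if x = 1 then (c.1, c.2 + 1) else c)
      (a, b)
    = (a + xs.countP (fun t => t == 0), b + xs.countP (fun t => t == 1)) := by
  induction xs generalizing a b with
  | nil => simp
  | cons x xs ih =>
    simp only [List.foldl_cons, List.countP_cons]
    by_cases h0 : x = 0
    · simp [h0, ih]; ring
    · by_cases h1 : x = 1
      · simp [h1, ih]; ring
      · simp [h0, h1, ih]

lemma pyRange_02 : PySem.List.pyRange 0 2 1 = [0, 1] := by decide

-- ===== VERDICT (by name: the statement is the Claim_ definition above) =====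
theorem mostFrequentlyOccurringValue_spec : Claim_equal_mostFrequentlyOccurringValue := by
  intro labels _
  unfold Spec_mostFrequentlyOccurringValue mostFrequentlyOccurringValue mostFrequentlyOccurringValue_alt segregate
  rw [pyRange_02, alt_counts]
  simp only [List.foldl_cons, List.foldl_nil, segregate_length, List.length_nil,
    zero_add]
  set c0 := labels.countP (fun t => t == 0) with hc0
  set c1 := labels.countP (fun t => t == 1) with hc1
  by_cases h : (c1 : Int) > (c0 : Int)
  · simp [h]
  · simp [h]
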